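-- pv_equiv track=rewrite | github.com/desintegrathor/Vietcong-Blender-plugin | vietcong_bes/core/bone_hierarchy.py | build_bone_hierarchy
-- ===== SOURCE A (Python) =====
-- from typing import Optional, List, Dict
--
-- ISKE_BONE_PARENTS = {
--     # Root
--     'Hips': None,
--
--     # Left leg chain
--     'LeftHip': 'Hips',
--     'LeftKnee': 'LeftHip',
--     'LeftAnkle': 'LeftKnee',
--     'LFoot': 'LeftAnkle',
--     'LToe': 'LFoot',
--
--     # Right leg chain
--     'RightHip': 'Hips',
--     'RightKnee': 'RightHip',
--     'RightAnkle': 'RightKnee',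
--     'RFoot': 'RightAnkle',
--     'RToe': 'RFoot',
--
--     # Spine
--     'Chest': 'Hips',
--
--     # Left arm chain
--     'LeftCollar': 'Chest',
--     'LeftShoulder': 'LeftCollar',
--     'LeftElbow': 'LeftShoulder',
--     'LeftWrist': 'LeftElbow',
--     'LeftFingers': 'LeftWrist',
--
--     # Right arm chain
--     'RightCollar': 'Chest',
--     'RightShoulder': 'RightCollar',
--     'RightElbow': 'RightShoulder',
--     'RightWrist': 'RightElbow',
--     'RightFingers': 'RightWrist',
--
--     # Head chain
--     'Neck': 'Chest',
--     'Head': 'Neck',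
--     'HeadTop': 'Head',
--
--     # Weapon attachment
--     'Weapon': 'RightWrist',
-- }
--
-- def get_bone_parent(bone_name: str) -> Optional[str]:
--     """Get parent bone name for ISKE bone.
--
--     Args:
--         bone_name: Name of the bone
--
--     Returns:
--         Parent bone name, or None if root or unknown
--     """
--     return ISKE_BONE_PARENTS.get(bone_name)
--
-- def build_bone_hierarchy(bone_names: List[str]) -> Dict[Optional[str], List[str]]:
--     """Build hierarchy dict from list of bone names.
--
--     Args:
--         bone_names: List of bone names found in file
--
--     Returns:
--         Dict mapping parent -> [children]
--         Key None contains root bones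
--     """
--     hierarchy: Dict[Optional[str], List[str]] = {}
--     for name in bone_names:
--         parent = get_bone_parent(name)
--         if parent not in hierarchy:
--             hierarchy[parent] = []
--         hierarchy[parent].append(name)
--     return hierarchy
-- ===== SOURCE B (Python) =====
-- # B: recursive partition grouping — take the first name's parent, split the remaining
-- # names into that group and the rest, recurse on the rest; parent lookup walks bone
-- # CHAIN lists (parent = predecessor in its chain) instead of a flat parent dict.
-- from typing import Optional, List, Dict
--
-- BONE_CHAINS = [
--     ['Hips', 'LeftHip', 'LeftKnee', 'LeftAnkle', 'LFoot', 'LToe'],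
--     ['Hips', 'RightHip', 'RightKnee', 'RightAnkle', 'RFoot', 'RToe'],
--     ['Hips', 'Chest', 'Neck', 'Head', 'HeadTop'],
--     ['Chest', 'LeftCollar', 'LeftShoulder', 'LeftElbow', 'LeftWrist', 'LeftFingers'],
--     ['Chest', 'RightCollar', 'RightShoulder', 'RightElbow', 'RightWrist', 'RightFingers'],
--     ['RightWrist', 'Weapon'],
-- ]
--
-- def get_bone_parent(bone_name: str) -> Optional[str]:
--     for chain in BONE_CHAINS:
--         if bone_name in chain[1:]:
--             return chain[chain.index(bone_name) - 1]
--     return None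
--
-- def build_bone_hierarchy(bone_names: List[str]) -> Dict[Optional[str], List[str]]:
--     if not bone_names:
--         return {}
--     head, *tail = bone_names
--     p = get_bone_parent(head)
--     group = [head] + [n for n in tail if get_bone_parent(n) == p]
--     rest = [n for n in tail if get_bone_parent(n) != p]
--     out = {p: group}
--     out.update(build_bone_hierarchy(rest))
--     return out
-- ===== Notes on version B (the rewrite author's own statement) =====
-- stated objective: alternative
-- what changed: A streams names once into a dict keyed by a flat parent-lookup table, appending to buckets; B recursively partitions the name list by the first name's parent (one group per recursion step) and derives each parent as the predecessor in bone-chain lists instead of a dict lookup.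
import Mathlib
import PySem

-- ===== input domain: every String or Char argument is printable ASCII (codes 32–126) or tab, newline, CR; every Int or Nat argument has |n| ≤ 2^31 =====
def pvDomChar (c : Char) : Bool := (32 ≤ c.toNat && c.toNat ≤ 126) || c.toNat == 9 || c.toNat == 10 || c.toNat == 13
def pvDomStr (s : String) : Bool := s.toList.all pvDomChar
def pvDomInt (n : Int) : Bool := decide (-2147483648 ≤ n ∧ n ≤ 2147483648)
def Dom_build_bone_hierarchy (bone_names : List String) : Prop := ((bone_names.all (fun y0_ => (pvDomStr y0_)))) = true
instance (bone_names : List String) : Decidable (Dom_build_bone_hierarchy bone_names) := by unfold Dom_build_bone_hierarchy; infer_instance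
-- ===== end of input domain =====

-- B groups recursively: take the first name's parent, partition the remaining names into that
-- group and the rest, recurse on the rest; the parent lookup walks bone-chain lists (parent =
-- predecessor in a chain) instead of a flat parent dict. Alternative decomposition, same result.

-- ===== PORT A =====
def ISKE_BONE_PARENTS : PySem.Dict String (Option String) :=
  PySem.Dict.ofList [
    ("Hips", none),
    ("LeftHip", some "Hips"), ("LeftKnee", some "LeftHip"), ("LeftAnkle", some "LeftKnee"),
    ("LFoot", some "LeftAnkle"), ("LToe", some "LFoot"),
    ("RightHip", some "Hips"), ("RightKnee", some "RightHip"), ("RightAnkle", some "RightKnee"),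
    ("RFoot", some "RightAnkle"), ("RToe", some "RFoot"),
    ("Chest", some "Hips"),
    ("LeftCollar", some "Chest"), ("LeftShoulder", some "LeftCollar"), ("LeftElbow", some "LeftShoulder"),
    ("LeftWrist", some "LeftElbow"), ("LeftFingers", some "LeftWrist"),
    ("RightCollar", some "Chest"), ("RightShoulder", some "RightCollar"), ("RightElbow", some "RightShoulder"),
    ("RightWrist", some "RightElbow"), ("RightFingers", some "RightWrist"),
    ("Neck", some "Chest"), ("Head", some "Neck"), ("HeadTop", some "Head"),
    ("Weapon", some "RightWrist")]

def get_bone_parent (bone_name : String) : Option String :=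
  ISKE_BONE_PARENTS.getD bone_name none

def build_bone_hierarchy (bone_names : List String) : List (Option String × List String) :=
  (bone_names.foldl (fun hierarchy name =>
      let parent := get_bone_parent name
      let hierarchy := if hierarchy.contains parent then hierarchy else hierarchy.insert parent []
      hierarchy.modify parent [] (fun l => l ++ [name]))
    PySem.Dict.empty).items

-- ===== PORT B =====
def BONE_CHAINS : List (List String) :=
  [["Hips", "LeftHip", "LeftKnee", "LeftAnkle", "LFoot", "LToe"],
   ["Hips", "RightHip", "RightKnee", "RightAnkle", "RFoot", "RToe"],
   ["Hips", "Chest", "Neck", "Head", "HeadTop"],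
   ["Chest", "LeftCollar", "LeftShoulder", "LeftElbow", "LeftWrist", "LeftFingers"],
   ["Chest", "RightCollar", "RightShoulder", "RightElbow", "RightWrist", "RightFingers"],
   ["RightWrist", "Weapon"]]

-- the 'for chain in BONE_CHAINS' loop of B's get_bone_parent, as structural recursion over the
-- chain list; the membership guard makes chain.index succeed and yield an index ≥ 1 (the chains
-- are duplicate-free), so '.getD default' on pyGet? of the nonempty chain is never the default
def chain_parent_loop : List (List String) → String → Option String
  | [], _ => none
  | chain :: rest, bone_name =>
    if (PySem.List.slice chain (some 1) none).contains bone_name then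
      match PySem.List.index? chain bone_name with
      | some i => PySem.List.pyGet? chain ((i : Int) - 1) |>.getD default
      | none => none
    else chain_parent_loop rest bone_name

def get_bone_parent_B (bone_name : String) : Option String :=
  match chain_parent_loop BONE_CHAINS bone_name with
  | some p => some p
  | none => none

def build_bone_hierarchy_alt (bone_names : List String) : List (Option String × List String) :=
  match bone_names with
  | [] => []
  | head :: tail =>
    let p := get_bone_parent_B head
    let group := head :: tail.filter (fun n => get_bone_parent_B n == p)
    let rest := tail.filter (fun n => !(get_bone_parent_B n == p))
    -- every name in rest has a parent ≠ p, so the recursive dict's keys avoid p: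
    -- Python's 'out.update(...)' appends those entries after (p, group)
    (p, group) :: build_bone_hierarchy_alt rest
termination_by bone_names.length
decreasing_by
  simp only [List.length_cons, List.length_unattach]
  exact Nat.lt_succ_of_le (le_trans (List.length_filter_le _ _) (by simp))

-- ===== PRECONDITION & SPEC =====
def Spec_build_bone_hierarchy (bone_names : List String) (out : List (Option String × List String)) : Prop := out = build_bone_hierarchy_alt bone_names
instance (bone_names : List String) (out : List (Option String × List String)) : Decidable (Spec_build_bone_hierarchy bone_names out) := by unfold Spec_build_bone_hierarchy; infer_instance

-- ===== CLAIM (what is proved, stated in full; the proofs are below) =====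
def Claim_equal_build_bone_hierarchy : Prop := ∀ (bone_names : List String), Dom_build_bone_hierarchy bone_names → Spec_build_bone_hierarchy bone_names (build_bone_hierarchy bone_names)

-- ===== LEMMAS AND PROOFS =====

-- the keys of A's parent table, used to split 'known bone' from 'unknown bone'
def BONE_KEYS : List String :=
  ["Hips", "LeftHip", "LeftKnee", "LeftAnkle", "LFoot", "LToe", "RightHip", "RightKnee",
   "RightAnkle", "RFoot", "RToe", "Chest", "LeftCollar", "LeftShoulder", "LeftElbow",
   "LeftWrist", "LeftFingers", "RightCollar", "RightShoulder", "RightElbow", "RightWrist",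
   "RightFingers", "Neck", "Head", "HeadTop", "Weapon"]

-- the two parent lookups agree on every string
theorem gbp_eq (n : String) : get_bone_parent_B n = get_bone_parent n := by
  by_cases h : n ∈ BONE_KEYS
  · simp only [BONE_KEYS, List.mem_cons, List.not_mem_nil, or_false] at h
    rcases h with rfl|rfl|rfl|rfl|rfl|rfl|rfl|rfl|rfl|rfl|rfl|rfl|rfl|rfl|rfl|rfl|rfl|rfl|rfl|rfl|rfl|rfl|rfl|rfl|rfl|rfl <;> decide
  · have hk : ISKE_BONE_PARENTS.keys = BONE_KEYS := by decide
    have hc : ISKE_BONE_PARENTS.contains n = false := by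
      rw [PySem.Dict.contains_eq_decide_mem_keys, hk]; simp [h]
    simp only [BONE_KEYS, List.mem_cons, List.not_mem_nil, or_false, not_or] at h
    obtain ⟨h1,h2,h3,h4,h5,h6,h7,h8,h9,h10,h11,h12,h13,h14,h15,h16,h17,h18,h19,h20,h21,h22,h23,h24,h25,h26⟩ := h
    simp [get_bone_parent_B, chain_parent_loop, BONE_CHAINS, get_bone_parent, PySem.List.slice,
      PySem.Dict.getD_of_not_contains _ _ hc,
      h2,h3,h4,h5,h6,h7,h8,h9,h10,h11,h12,h13,h14,h15,h16,h17,h18,h19,h20,h21,h22,h23,h24,h25,h26]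

-- A's step (insert-empty-if-absent, then append) is the same dict as a single modify-with-default.
theorem step_eq_modify (d : PySem.Dict (Option String) (List String)) (n : String) :
    (if d.contains (get_bone_parent n) then d else d.insert (get_bone_parent n) []).modify
        (get_bone_parent n) [] (fun l => l ++ [n])
      = d.modify (get_bone_parent n) [] (fun l => l ++ [n]) := by
  by_cases h : d.contains (get_bone_parent n) = true
  · simp [h]
  · simp only [Bool.not_eq_true] at h
    simp [h, PySem.Dict.modify, PySem.Dict.getD_insert_self,
      PySem.Dict.insert_insert_self, PySem.Dict.getD_of_not_contains d _ h]

-- A's whole loop is the canonical grouping fold over (parent, name) pairs.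
theorem fold_eq_pair_fold (bone_names : List String) :
    bone_names.foldl (fun hierarchy name =>
        let parent := get_bone_parent name
        let hierarchy := if hierarchy.contains parent then hierarchy else hierarchy.insert parent []
        hierarchy.modify parent [] (fun l => l ++ [name]))
      PySem.Dict.empty
    = (bone_names.map (fun n => (get_bone_parent n, n))).foldl
        (fun d p => d.modify p.1 [] (fun l => l ++ [p.2])) PySem.Dict.empty := by
  rw [List.foldl_map]
  exact PySem.List.foldl_congr_mem bone_names _ _ _ (fun d n _ => step_eq_modify d n)

-- A's result in closed form: distinct parents in first-occurrence order, each with its filtered group.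
theorem A_closed_form (bone_names : List String) :
    build_bone_hierarchy bone_names
      = (PySem.List.dedup (bone_names.map get_bone_parent)).map
          (fun p => (p, bone_names.filter (fun n => get_bone_parent n == p))) := by
  unfold build_bone_hierarchy
  rw [fold_eq_pair_fold]
  set l := bone_names.map (fun n => (get_bone_parent n, n)) with hl
  set D := l.foldl (fun d p => d.modify p.1 [] (fun v => v ++ [p.2])) PySem.Dict.empty with hD
  have hkeys : D.keys = PySem.Set.ofList (bone_names.map get_bone_parent) := by
    rw [hD, PySem.Dict.keys_foldl_modify_key l Prod.fst [] (fun _ p v => v ++ [p.2])]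
    simp [hl, PySem.Set.ofList, PySem.Set.update, List.map_map, Function.comp_def]
  have hnodup : D.keys.Nodup := by
    rw [hD]
    exact PySem.Dict.nodup_keys_foldl_modify_key l Prod.fst [] (fun _ p v => v ++ [p.2]) _ (by simp)
  have hget : ∀ k, D.getD k [] = bone_names.filter (fun n => get_bone_parent n == k) := by
    intro k
    rw [hD, PySem.Dict.getD_foldl_modify_append l PySem.Dict.empty k]
    simp [hl, List.filter_map, List.map_map, Function.comp_def]
  rw [PySem.Dict.items_eq_map_keys D hnodup [], hkeys]
  simp only [PySem.List.dedup]
  exact List.map_congr_left (fun k _ => by rw [hget k])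

-- Set.discard is a filter (definitional).
theorem discard_eq_filter (s : PySem.Set (Option String)) (x : Option String) :
    PySem.Set.discard s x = s.filter (fun y => !(y == x)) := rfl

-- filtering commutes with first-occurrence dedup
theorem ofList_filter (xs : List (Option String)) (p : Option String → Bool) :
    (PySem.Set.ofList xs).filter p = PySem.Set.ofList (xs.filter p) := by
  induction xs with
  | nil => rfl
  | cons a t ih =>
    by_cases hp : p a
    · simp only [PySem.Set.ofList_cons, List.filter_cons, hp, if_pos, discard_eq_filter,
        List.filter_filter, ← ih]
      exact congrArg (a :: ·) (List.filter_congr (fun y _ => Bool.and_comm _ _))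
    · simp only [PySem.Set.ofList_cons, List.filter_cons, hp, if_neg, Bool.false_eq_true,
        not_false_iff, discard_eq_filter, List.filter_filter, ← ih]
      refine List.filter_congr (fun y _ => ?_)
      by_cases hy : y = a
      · subst hy; simp [hp]
      · simp [hy]

-- dedup of a cons: the head, then the dedup of the tail purged of the head
theorem dedup_cons (xs : List (Option String)) (x : Option String) :
    PySem.List.dedup (x :: xs) = x :: PySem.List.dedup (xs.filter (fun y => !(y == x))) := by
  simp only [PySem.List.dedup_eq_ofList, PySem.Set.ofList_cons, discard_eq_filter, ofList_filter]

-- B's recursion computes the same closed form.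
theorem B_closed_form (bone_names : List String) :
    build_bone_hierarchy_alt bone_names
      = (PySem.List.dedup (bone_names.map get_bone_parent)).map
          (fun p => (p, bone_names.filter (fun n => get_bone_parent n == p))) := by
  suffices h : ∀ (N : Nat) (l : List String), l.length ≤ N →
      build_bone_hierarchy_alt l
        = (PySem.List.dedup (l.map get_bone_parent)).map
            (fun p => (p, l.filter (fun n => get_bone_parent n == p))) from
    h bone_names.length bone_names le_rfl
  intro N
  induction N with
  | zero =>
    intro l hl
    rw [List.length_eq_zero_iff.mp (Nat.le_zero.mp hl), build_bone_hierarchy_alt]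
    simp [PySem.List.dedup_eq_ofList]
  | succ N ih =>
    intro l hl
    match l with
    | [] => rw [build_bone_hierarchy_alt]; simp [PySem.List.dedup_eq_ofList]
    | head :: tail =>
      rw [build_bone_hierarchy_alt]
      simp only [gbp_eq]
      have hrest : (tail.filter (fun n => !(get_bone_parent n == get_bone_parent head))).length ≤ N :=
        le_trans (List.length_filter_le _ _) (Nat.le_of_succ_le_succ hl)
      rw [ih _ hrest]
      rw [List.map_cons, dedup_cons, List.map_cons]
      have hmap : (tail.map get_bone_parent).filter (fun q => !(q == get_bone_parent head))
          = (tail.filter (fun n => !(get_bone_parent n == get_bone_parent head))).map get_bone_parent := by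
        rw [List.filter_map]; rfl
      rw [hmap]
      congr 1
      · simp
      · refine List.map_congr_left (fun q hq => ?_)
        have hqmem : q ∈ (tail.filter (fun n => !(get_bone_parent n == get_bone_parent head))).map get_bone_parent := by
          simpa [PySem.List.dedup_eq_ofList, PySem.Set.mem_ofList] using hq
        have hqne : q ≠ get_bone_parent head := by
          obtain ⟨n, hn, rfl⟩ := List.mem_map.mp hqmem
          have := List.of_mem_filter hn
          simpa using this
        have h1 : (head :: tail).filter (fun n => get_bone_parent n == q)
            = tail.filter (fun n => get_bone_parent n == q) := by
          rw [List.filter_cons]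
          simp [Ne.symm hqne]
        have h2 : (tail.filter (fun n => !(get_bone_parent n == get_bone_parent head))).filter
              (fun n => get_bone_parent n == q)
            = tail.filter (fun n => get_bone_parent n == q) := by
          rw [List.filter_filter]
          refine List.filter_congr (fun n _ => ?_)
          by_cases hng : get_bone_parent n = q
          · simp [hng, hqne]
          · simp [hng]
        rw [h1, h2]

-- ===== VERDICT (by name: the statement is the Claim_ definition above) =====
theorem build_bone_hierarchy_spec : Claim_equal_build_bone_hierarchy := by
  intro bone_names _
  unfold Spec_build_bone_hierarchy
  rw [A_closed_form, B_closed_form]
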